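-- pv_equiv track=rewrite | github.com/arnokamphuis/AdventOfCode | 2025/day08-25/day08-25.py | all_distances
-- ===== SOURCE A (Python) =====
-- from collections import defaultdict
--
-- def all_distances(junctions):
--     dist_map = defaultdict(list)
--     for b1 in junctions:
--         for b2 in junctions:
--             if b1 != b2:
--                 dist = (b1[0]-b2[0])**2 + (b1[1]-b2[1])**2 + (b1[2]-b2[2])**2
--                 dist_map[dist].append((min(b1, b2), max(b1, b2)))
--     return {k: dist_map[k] for k in sorted(dist_map.keys())}
-- ===== SOURCE B (Python) =====
-- def all_distances(junctions):
--     # Sort the flat (distance, ordered-pair) stream by distance (stable), then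
--     # sweep once, cutting it into adjacent runs of equal distance: no dict is
--     # used for grouping and no key set is collected or sorted separately.
--     pairs = sorted(
--         (((b1[0]-b2[0])**2 + (b1[1]-b2[1])**2 + (b1[2]-b2[2])**2,
--           (min(b1, b2), max(b1, b2)))
--          for b1 in junctions for b2 in junctions if b1 != b2),
--         key=lambda t: t[0])
--     groups = []
--     for d, p in pairs:
--         if groups and groups[-1][0] == d:
--             groups[-1][1].append(p)
--         else:
--             groups.append((d, [p]))
--     return dict(groups)
-- ===== Notes on version B (the rewrite author's own statement) =====
-- stated objective: alternative
-- what changed: B replaces A's defaultdict grouping inside the nested loops plus a final sorted-keys dict rebuild with a sort-then-sweep: it stable-sorts the flat (distance, pair) stream by distance alone and cuts it into adjacent equal-distance runs in one linear sweep, comparing each element only with the last open run (no dict, no separate key set).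
import Mathlib
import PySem

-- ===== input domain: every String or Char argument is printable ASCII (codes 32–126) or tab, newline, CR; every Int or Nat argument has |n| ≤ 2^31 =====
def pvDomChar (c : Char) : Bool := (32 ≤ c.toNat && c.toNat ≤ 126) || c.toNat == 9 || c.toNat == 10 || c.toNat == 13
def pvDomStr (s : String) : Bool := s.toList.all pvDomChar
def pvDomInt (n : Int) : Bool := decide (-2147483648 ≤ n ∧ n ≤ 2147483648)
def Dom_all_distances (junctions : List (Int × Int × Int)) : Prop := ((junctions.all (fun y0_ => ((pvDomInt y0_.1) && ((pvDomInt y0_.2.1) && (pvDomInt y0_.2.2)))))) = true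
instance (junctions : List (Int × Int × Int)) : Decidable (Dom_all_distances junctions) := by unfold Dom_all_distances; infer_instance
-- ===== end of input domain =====

-- B stable-sorts the flat (distance, pair) stream by distance and cuts it into adjacent
-- equal-distance runs in one sweep, instead of A's defaultdict grouping inside the nested
-- loops plus a sorted-keys dict rebuild (alternative decomposition, same cost).

-- Python's lexicographic '<' on 3-tuples of ints (behind min/max in both programs)
def pvLt3 (a b : Int × Int × Int) : Bool :=
  a.1 < b.1 || (a.1 == b.1 && (a.2.1 < b.2.1 || (a.2.1 == b.2.1 && a.2.2 < b.2.2)))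
-- Python min(a, b) / max(a, b) on 3-tuples
def pvMin3 (a b : Int × Int × Int) : Int × Int × Int := if pvLt3 b a then b else a
def pvMax3 (a b : Int × Int × Int) : Int × Int × Int := if pvLt3 a b then b else a
-- the squared distance both programs compute
def pvSq (b1 b2 : Int × Int × Int) : Int :=
  (b1.1 - b2.1) ^ 2 + (b1.2.1 - b2.2.1) ^ 2 + (b1.2.2 - b2.2.2) ^ 2

-- ===== PORT A =====
def all_distances (junctions : List (Int × Int × Int)) : List (Int × List ((Int × Int × Int) × (Int × Int × Int))) :=
  let dist_map : PySem.Dict Int (List ((Int × Int × Int) × (Int × Int × Int))) :=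
    junctions.foldl (fun d b1 =>
      junctions.foldl (fun d b2 =>
        if b1 != b2 then
          d.modify (pvSq b1 b2) [] (· ++ [(pvMin3 b1 b2, pvMax3 b1 b2)])
        else d) d) PySem.Dict.empty
  (PySem.List.sorted dist_map.keys (fun k => k) false).map (fun k => (k, dist_map.getD k []))

-- ===== PORT B =====
-- B's run-cutting loop body: append to the last open run if its distance matches, else open a new run
def pvStep {β : Type} (acc : List (Int × List β)) (x : Int × β) : List (Int × List β) :=
  match acc.getLast? with
  | some (d, g) => if d == x.1 then acc.dropLast ++ [(d, g ++ [x.2])] else acc ++ [(x.1, [x.2])]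
  | none => [(x.1, [x.2])]

def all_distances_alt (junctions : List (Int × Int × Int)) : List (Int × List ((Int × Int × Int) × (Int × Int × Int))) :=
  let pairs := PySem.List.sorted
    (junctions.flatMap (fun b1 =>
      (junctions.filter (fun b2 => b1 != b2)).map
        (fun b2 => (pvSq b1 b2, (pvMin3 b1 b2, pvMax3 b1 b2)))))
    (fun t => t.1) false
  let groups := pairs.foldl pvStep []
  (PySem.Dict.ofList groups).items

-- ===== PRECONDITION & SPEC =====
def Spec_all_distances (junctions : List (Int × Int × Int)) (out : List (Int × List ((Int × Int × Int) × (Int × Int × Int)))) : Prop := out = all_distances_alt junctions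
instance (junctions : List (Int × Int × Int)) (out : List (Int × List ((Int × Int × Int) × (Int × Int × Int)))) : Decidable (Spec_all_distances junctions out) := by unfold Spec_all_distances; infer_instance

-- ===== CLAIM (what is proved, stated in full; the proofs are below) =====
def Claim_equal_all_distances : Prop := ∀ (junctions : List (Int × Int × Int)), Dom_all_distances junctions → Spec_all_distances junctions (all_distances junctions)

-- ===== LEMMAS AND PROOFS =====

-- the flat emission list both programs' groups are made of
def pvPairs (junctions : List (Int × Int × Int)) : List (Int × ((Int × Int × Int) × (Int × Int × Int))) :=
  junctions.flatMap (fun b1 =>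
    (junctions.filter (fun b2 => b1 != b2)).map
      (fun b2 => (pvSq b1 b2, (pvMin3 b1 b2, pvMax3 b1 b2))))

lemma pv_foldl_flatMap {α β γ : Type} (l : List α) (g : α → List β) (f : γ → β → γ) (init : γ) :
    (l.flatMap g).foldl f init = l.foldl (fun d x => (g x).foldl f d) init := by
  induction l generalizing init with
  | nil => rfl
  | cons h t ih => simp [List.foldl_append, ih]

-- A's nested appending loop is the single fold over the flat emission list
lemma pv_distMapA_eq (junctions : List (Int × Int × Int)) :
    (junctions.foldl (fun d b1 =>
      junctions.foldl (fun d b2 =>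
        if b1 != b2 then
          d.modify (pvSq b1 b2) [] (· ++ [(pvMin3 b1 b2, pvMax3 b1 b2)])
        else d) d) PySem.Dict.empty)
    = (pvPairs junctions).foldl (fun d p => d.modify p.1 [] (· ++ [p.2])) PySem.Dict.empty := by
  rw [pvPairs, pv_foldl_flatMap]
  apply PySem.List.foldl_congr_mem
  intro d b1 _
  rw [List.foldl_map, ← PySem.List.foldl_if_eq_foldl_filter]

-- A's result in closed form: sorted distinct distances, each with the filter of the emission list
lemma pv_A_eq (junctions : List (Int × Int × Int)) :
    all_distances junctions
      = (PySem.List.sorted (PySem.Set.ofList ((pvPairs junctions).map (·.1))) (fun k => k) false).map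
          (fun k => (k, (((pvPairs junctions).filter (fun p => p.1 == k)).map (·.2)))) := by
  unfold all_distances
  dsimp only
  rw [pv_distMapA_eq]
  set P := pvPairs junctions with hP
  have hkeys : (P.foldl (fun d p => d.modify p.1 [] (· ++ [p.2])) PySem.Dict.empty).keys
      = PySem.Set.ofList (P.map (·.1)) := by
    have h := PySem.Dict.keys_foldl_modify_key P (fun p => p.1) [] (fun _ p v => v ++ [p.2]) PySem.Dict.empty
    rw [show (PySem.Dict.empty : PySem.Dict Int (List ((Int × Int × Int) × (Int × Int × Int)))).keys = ([] : List Int) from rfl,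
      show PySem.Set.update ([] : List Int) (P.map (fun p => p.1)) = PySem.Set.ofList (P.map (fun p => p.1)) from rfl] at h
    exact h
  rw [hkeys]
  refine List.map_congr_left (fun k _ => ?_)
  rw [PySem.Dict.getD_foldl_modify_append]
  simp [PySem.Dict.getD_empty]

-- appending one element to the input of Python's stable sort inserts it after all ≤-key elements
lemma pv_sorted_append_singleton {α κ : Type} [LinearOrder κ] (P : List α) (p : α) (key : α → κ) :
    PySem.List.sorted (P ++ [p]) key false
      = PySem.List.insertBy (fun a b => decide (key a < key b)) p (PySem.List.sorted P key false) := by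
  rw [PySem.List.sorted_eq_foldl_insertBy, PySem.List.sorted_eq_foldl_insertBy, List.foldl_append]
  rfl

-- insertBy lands exactly between a no-prefix and a yes-suffix
lemma pv_insertBy_split {α : Type} (before : α → α → Bool) (x : α) (L1 L2 : List α)
    (h1 : ∀ y ∈ L1, before x y = false)
    (h2 : ∀ y ∈ L2.head?, before x y = true) :
    PySem.List.insertBy before x (L1 ++ L2) = L1 ++ x :: L2 := by
  induction L1 with
  | nil =>
    cases L2 with
    | nil => rfl
    | cons h t => simp [PySem.List.insertBy, h2 h (by simp)]
  | cons a t ih =>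
    have ha : before x a = false := h1 a (by simp)
    simp [PySem.List.insertBy, ha, ih (fun y hy => h1 y (by simp [hy]))]

-- a strictly increasing list splits around a member…
lemma pv_split_mem (K : List Int) (k : Int) (hK : K.Pairwise (· < ·)) (hk : k ∈ K) :
    ∃ K1 K2, K = K1 ++ k :: K2 ∧ (∀ c ∈ K1, c < k) ∧ (∀ c ∈ K2, k < c) := by
  induction K with
  | nil => simp at hk
  | cons c T ih =>
    rw [List.pairwise_cons] at hK
    rcases List.mem_cons.mp hk with hck | hkT
    · exact ⟨[], T, by simp [hck], by simp, fun b hb => hck ▸ hK.1 b hb⟩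
    · obtain ⟨K1, K2, hEq, hlt, hgt⟩ := ih hK.2 hkT
      exact ⟨c :: K1, K2, by simp [hEq],
        fun b hb => by
          rcases List.mem_cons.mp hb with h | h
          · exact h ▸ hK.1 k hkT
          · exact hlt b h,
        hgt⟩

-- …and around a non-member
lemma pv_split_not_mem (K : List Int) (k : Int) (hK : K.Pairwise (· < ·)) (hk : k ∉ K) :
    ∃ K1 K2, K = K1 ++ K2 ∧ (∀ c ∈ K1, c < k) ∧ (∀ c ∈ K2, k < c) := by
  induction K with
  | nil => exact ⟨[], [], rfl, by simp, by simp⟩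
  | cons c T ih =>
    rw [List.pairwise_cons] at hK
    have hck : c ≠ k := fun h => hk (h ▸ List.mem_cons_self)
    by_cases hclt : c < k
    · obtain ⟨K1, K2, hEq, hlt, hgt⟩ := ih hK.2 (fun h => hk (List.mem_cons_of_mem _ h))
      exact ⟨c :: K1, K2, by simp [hEq],
        fun b hb => by
          rcases List.mem_cons.mp hb with h | h
          · exact h ▸ hclt
          · exact hlt b h,
        hgt⟩
    · refine ⟨[], c :: T, rfl, by simp, fun b hb => ?_⟩
      have hkc : k < c := by omega
      rcases List.mem_cons.mp hb with h | h
      · omega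
      · exact lt_trans hkc (hK.1 b h)

lemma pv_mem_filter_key {β : Type} (P : List (Int × β)) (c : Int) (y : Int × β)
    (hy : y ∈ P.filter (fun p => p.1 == c)) : y.1 = c := by
  simp only [List.mem_filter, beq_iff_eq] at hy
  exact hy.2

-- STABILITY + DECOMPOSITION: the stable sort by key is the concatenation, over the sorted
-- distinct keys, of the key-filters of the original list
lemma pv_sorted_eq_flat {β : Type} (P : List (Int × β)) :
    PySem.List.sorted P (fun t => t.1) false
      = (PySem.List.sorted (PySem.Set.ofList (P.map (·.1))) (fun k => k) false).flatMap
          (fun k => P.filter (fun p => p.1 == k)) := by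
  induction P using List.reverseRecOn with
  | nil => rfl
  | append_singleton P p ih =>
    set k := p.1 with hk
    set K := PySem.List.sorted (PySem.Set.ofList (P.map (·.1))) (fun c : Int => c) false with hK
    have hKp : K.Pairwise (· < ·) := PySem.List.sorted_ofList_pairwise_lt (P.map (·.1))
    have hmapf : (P ++ [p]).map (·.1) = P.map (·.1) ++ [k] := by simp [hk]
    have hfilt : ∀ c : Int, (P ++ [p]).filter (fun q => q.1 == c)
        = P.filter (fun q => q.1 == c) ++ (if k == c then [p] else []) := by
      intro c
      rw [List.filter_append]
      congr 1
      by_cases h : p.1 = c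
      · simp [List.filter, hk, h]
      · have hb : (p.1 == c) = false := by simp [h]
        simp [List.filter, hk, hb]
    rw [pv_sorted_append_singleton, ih, hmapf, PySem.Set.ofList_append_singleton]
    by_cases hmem : k ∈ P.map (·.1)
    · -- k already among the keys: the key list is unchanged
      rw [PySem.Set.add_of_mem ((PySem.Set.mem_ofList _ _).mpr hmem), ← hK]
      have hkK : k ∈ K := by
        rw [hK, PySem.List.mem_sorted, PySem.Set.mem_ofList]; exact hmem
      obtain ⟨K1, K2, hEq, hlt, hgt⟩ := pv_split_mem K k hKp hkK
      have hnotk1 : ∀ c ∈ K1, ¬ (k == c) = true := fun c hc => by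
        have := hlt c hc; simp; omega
      have hnotk2 : ∀ c ∈ K2, ¬ (k == c) = true := fun c hc => by
        have := hgt c hc; simp; omega
      rw [hEq]
      rw [List.flatMap_append, List.flatMap_cons, List.flatMap_append, List.flatMap_cons]
      rw [← List.append_assoc, ← List.append_assoc]
      rw [pv_insertBy_split _ p (K1.flatMap (fun c => P.filter (fun q => q.1 == c)) ++ P.filter (fun q => q.1 == k)) (K2.flatMap (fun c => P.filter (fun q => q.1 == c)))]
      · -- both sides are the three blocks with p spliced after the k-group
        have h1 : ∀ c ∈ K1, (P ++ [p]).filter (fun q => q.1 == c) = P.filter (fun q => q.1 == c) := by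
          intro c hc; rw [hfilt c, if_neg (hnotk1 c hc)]; simp
        have h2 : ∀ c ∈ K2, (P ++ [p]).filter (fun q => q.1 == c) = P.filter (fun q => q.1 == c) := by
          intro c hc; rw [hfilt c, if_neg (hnotk2 c hc)]; simp
        rw [List.flatMap_congr h1, List.flatMap_congr h2, hfilt k, if_pos (by simp)]
        simp
      · intro y hy
        rcases List.mem_append.mp hy with h | h
        · obtain ⟨c, hc, hyc⟩ := List.mem_flatMap.mp h
          have := pv_mem_filter_key P c y hyc
          have := hlt c hc
          simp; omega
        · have := pv_mem_filter_key P k y h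
          simp; omega
      · intro y hy
        have hyL : y ∈ K2.flatMap (fun c => P.filter (fun q => q.1 == c)) := by
          cases hL : K2.flatMap (fun c => P.filter (fun q => q.1 == c)) with
          | nil => rw [hL] at hy; simp at hy
          | cons a t => rw [hL] at hy; simp at hy; subst hy; exact List.mem_cons_self
        obtain ⟨c, hc, hyc⟩ := List.mem_flatMap.mp hyL
        have := pv_mem_filter_key P c y hyc
        have := hgt c hc
        simp; omega
    · -- fresh key: it is inserted into the key list at its sorted position
      rw [PySem.Set.add_of_not_mem (fun h => hmem ((PySem.Set.mem_ofList _ _).mp h))]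
      have hkK : k ∉ K := by
        rw [hK, PySem.List.mem_sorted, PySem.Set.mem_ofList]; exact hmem
      obtain ⟨K1, K2, hEq, hlt, hgt⟩ := pv_split_not_mem K k hKp hkK
      have hfk : P.filter (fun q => q.1 == k) = [] := by
        rw [List.filter_eq_nil_iff]
        intro q hq hqk
        exact hmem (List.mem_map.mpr ⟨q, hq, by simpa using hqk⟩)
      have hKnew : PySem.List.sorted (PySem.Set.ofList (P.map (·.1)) ++ [k]) (fun c : Int => c) false
          = K1 ++ k :: K2 := by
        rw [pv_sorted_append_singleton, ← hK, hEq]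
        refine pv_insertBy_split _ k K1 K2 (fun c hc => by have := hlt c hc; simp; omega) (fun c hc => ?_)
        have hcK2 : c ∈ K2 := by
          cases hL : K2 with
          | nil => rw [hL] at hc; simp at hc
          | cons a t => rw [hL] at hc; simp at hc; subst hc; exact List.mem_cons_self
        have := hgt c hcK2
        simp; omega
      rw [hKnew, hEq]
      have hnotk1 : ∀ c ∈ K1, ¬ (k == c) = true := fun c hc => by
        have := hlt c hc; simp; omega
      have hnotk2 : ∀ c ∈ K2, ¬ (k == c) = true := fun c hc => by
        have := hgt c hc; simp; omega
      have h1 : ∀ c ∈ K1, (P ++ [p]).filter (fun q => q.1 == c) = P.filter (fun q => q.1 == c) := by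
        intro c hc; rw [hfilt c, if_neg (hnotk1 c hc)]; simp
      have h2 : ∀ c ∈ K2, (P ++ [p]).filter (fun q => q.1 == c) = P.filter (fun q => q.1 == c) := by
        intro c hc; rw [hfilt c, if_neg (hnotk2 c hc)]; simp
      rw [List.flatMap_append, List.flatMap_append, List.flatMap_cons]
      rw [List.flatMap_congr h1, List.flatMap_congr h2, hfilt k, if_pos (by simp), hfk]
      rw [pv_insertBy_split _ p (K1.flatMap (fun c => P.filter (fun q => q.1 == c))) (K2.flatMap (fun c => P.filter (fun q => q.1 == c)))]
      · simp
      · intro y hy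
        obtain ⟨c, hc, hyc⟩ := List.mem_flatMap.mp hy
        have := pv_mem_filter_key P c y hyc
        have := hlt c hc
        simp; omega
      · intro y hy
        have hyL : y ∈ K2.flatMap (fun c => P.filter (fun q => q.1 == c)) := by
          cases hL : K2.flatMap (fun c => P.filter (fun q => q.1 == c)) with
          | nil => rw [hL] at hy; simp at hy
          | cons a t => rw [hL] at hy; simp at hy; subst hy; exact List.mem_cons_self
        obtain ⟨c, hc, hyc⟩ := List.mem_flatMap.mp hyL
        have := pv_mem_filter_key P c y hyc
        have := hgt c hc
        simp; omega

-- the sweep extends the open last run over a same-key run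
lemma pv_foldl_run {β : Type} (L : List (Int × β)) (k : Int) (hL : ∀ x ∈ L, x.1 = k)
    (acc0 : List (Int × List β)) (g : List β) :
    L.foldl pvStep (acc0 ++ [(k, g)]) = acc0 ++ [(k, g ++ L.map (·.2))] := by
  induction L generalizing g with
  | nil => simp
  | cons x t ih =>
    have hx : x.1 = k := hL x (by simp)
    have hstep : pvStep (acc0 ++ [(k, g)]) x = acc0 ++ [(k, g ++ [x.2])] := by
      simp [pvStep, hx]
    rw [List.foldl_cons, hstep, ih (fun y hy => hL y (by simp [hy]))]
    simp

-- the sweep over groups laid out by strictly increasing key produces one run per group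
lemma pv_foldl_groups {β : Type} (G : Int → List (Int × β)) (K : List Int) :
    ∀ (acc : List (Int × List β)),
    K.Pairwise (· < ·) →
    (∀ k ∈ K, G k ≠ []) →
    (∀ k ∈ K, ∀ q ∈ G k, q.1 = k) →
    (∀ k ∈ K, ∀ l ∈ acc.getLast?, l.1 ≠ k) →
    (K.flatMap G).foldl pvStep acc = acc ++ K.map (fun k => (k, (G k).map (·.2))) := by
  induction K with
  | nil => intro acc _ _ _ _; simp
  | cons k T ih =>
    intro acc hp hne hkey hlast
    rw [List.pairwise_cons] at hp
    obtain ⟨q, rest, hG⟩ := List.exists_cons_of_ne_nil (hne k List.mem_cons_self)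
    have hqk : q.1 = k := hkey k List.mem_cons_self q (by rw [hG]; exact List.mem_cons_self)
    have hstep0 : pvStep acc q = acc ++ [(k, [q.2])] := by
      cases hacc : acc.getLast? with
      | none =>
        have : acc = [] := List.getLast?_eq_none_iff.mp hacc
        simp [pvStep, this, hqk]
      | some l =>
        have hne' : l.1 ≠ k := hlast k List.mem_cons_self l (by rw [hacc]; rfl)
        obtain ⟨d, g⟩ := l
        simp only at hne'
        simp [pvStep, hacc, hqk, hne']
    have hrun : rest.foldl pvStep (acc ++ [(k, [q.2])]) = acc ++ [(k, (G k).map (·.2))] := by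
      rw [pv_foldl_run rest k (fun y hy => hkey k List.mem_cons_self y (by rw [hG]; exact List.mem_cons_of_mem _ hy)) acc [q.2]]
      rw [hG]; simp
    rw [List.flatMap_cons, List.foldl_append, hG, List.foldl_cons, hstep0, hrun]
    rw [ih (acc ++ [(k, (G k).map (·.2))]) hp.2
      (fun c hc => hne c (List.mem_cons_of_mem _ hc))
      (fun c hc => hkey c (List.mem_cons_of_mem _ hc))
      (fun c hc l hl => by
        rw [List.getLast?_concat] at hl
        simp only [Option.mem_def, Option.some_inj] at hl
        subst hl
        have := hp.1 c hc
        simp; omega)]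
    simp

-- dict(groups) over distinct keys is the identity on the association list
lemma pv_dict_items {β : Type} (G : List (Int × List β)) (hnd : (G.map (·.1)).Nodup) :
    (PySem.Dict.ofList G).items = G := by
  show (G.foldl (fun acc p => acc.insert p.1 p.2) PySem.Dict.empty).items = G
  have h := PySem.Dict.items_foldl_insert_fresh G (fun p => p.1) (fun p => p.2) PySem.Dict.empty
    (fun a _ => by simp [pysem]) hnd
  simpa using h

-- ===== VERDICT (by name: the statement is the Claim_ definition above) =====
theorem all_distances_spec : Claim_equal_all_distances := by
  intro junctions _
  show all_distances junctions = all_distances_alt junctions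
  rw [pv_A_eq]
  unfold all_distances_alt
  dsimp only
  set P := pvPairs junctions with hP
  set K := PySem.List.sorted (PySem.Set.ofList (P.map (·.1))) (fun k : Int => k) false with hK
  have hKp : K.Pairwise (· < ·) := PySem.List.sorted_ofList_pairwise_lt (P.map (·.1))
  have hsorted : PySem.List.sorted P (fun t => t.1) false
      = K.flatMap (fun k => P.filter (fun p => p.1 == k)) := pv_sorted_eq_flat P
  rw [show (junctions.flatMap (fun b1 =>
      (junctions.filter (fun b2 => b1 != b2)).map
        (fun b2 => (pvSq b1 b2, (pvMin3 b1 b2, pvMax3 b1 b2))))) = P from rfl]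
  rw [hsorted]
  rw [pv_foldl_groups (fun k => P.filter (fun p => p.1 == k)) K [] hKp
    (fun k hk => by
      have hmem : k ∈ P.map (·.1) := by
        rw [hK, PySem.List.mem_sorted, PySem.Set.mem_ofList] at hk; exact hk
      obtain ⟨q, hq, hq1⟩ := List.mem_map.mp hmem
      intro hnil
      rw [List.filter_eq_nil_iff] at hnil
      exact hnil q hq (by simp [hq1])
    )
    (fun k _ q hq => pv_mem_filter_key P k q hq)
    (fun k _ l hl => by simp at hl)]
  rw [List.nil_append]
  rw [pv_dict_items _ (by
    have : (K.map (fun k => (k, ((P.filter (fun p => p.1 == k)).map (·.2))))).map (·.1) = K := by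
      simp [Function.comp_def]
    rw [this]
    exact hKp.imp ne_of_lt
  )]
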